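-- pv_equiv track=rewrite | github.com/2001Haru/CloseClaw | closeclaw/memory/memory_manager.py | _normalize_memory_content
-- ===== SOURCE A (Python) =====
-- def _normalize_memory_content(content: str) -> str:
--     """Apply lightweight cleanup before storing memory text."""
--     lines = [line.rstrip() for line in content.replace("\r\n", "\n").split("\n")]
--     compact: list[str] = []
--     blank_streak = 0
--     for line in lines:
--         if line.strip() == "":
--             blank_streak += 1
--             if blank_streak > 1:
--                 continue
--             compact.append("")
--             continue
--         blank_streak = 0
--         compact.append(line.strip())
--     return "\n".join(compact).strip()
-- ===== SOURCE B (Python) =====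
-- def _normalize_memory_content(content: str) -> str:
--     """Pairwise filter: keep a line iff it is non-blank or follows a non-blank line."""
--     stripped = [line.strip() for line in content.replace("\r\n", "\n").split("\n")]
--     kept = [cur for prev, cur in zip([""] + stripped, stripped) if cur or prev]
--     return "\n".join(kept).strip()
-- ===== Notes on version B (the rewrite author's own statement) =====
-- stated objective: simpler
-- what changed: Replaces A's stateful blank_streak counter loop with a stateless pairwise pass: strip every line once, then keep a line iff it is non-blank or follows a non-blank line via zip(lines, shifted lines) and one filter.
import Mathlib
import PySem

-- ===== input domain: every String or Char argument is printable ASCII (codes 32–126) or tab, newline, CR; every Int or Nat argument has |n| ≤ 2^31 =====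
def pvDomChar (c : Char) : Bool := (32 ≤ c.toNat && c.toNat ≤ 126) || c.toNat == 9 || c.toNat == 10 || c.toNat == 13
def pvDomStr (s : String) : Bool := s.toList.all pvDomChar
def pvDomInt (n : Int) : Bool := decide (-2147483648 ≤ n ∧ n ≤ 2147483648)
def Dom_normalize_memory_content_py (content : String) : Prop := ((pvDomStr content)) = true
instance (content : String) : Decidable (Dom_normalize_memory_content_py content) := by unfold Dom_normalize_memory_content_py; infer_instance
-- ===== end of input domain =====

-- B replaces A's stateful blank-streak counter loop by a stateless pairwise zip/filter (keep a
-- stripped line iff it is non-blank or follows a non-blank line); objective: simpler, same value.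

-- ===== PORT A =====
def normalize_memory_content_py (content : String) : String :=
  let lines := ((PySem.Str.split? (PySem.Str.replace content "\r\n" "\n") "\n").getD []).map PySem.Str.rstrip
  let r := lines.foldl (fun (acc : List String × Int) line =>
      if PySem.Str.strip line == "" then
        if acc.2 + 1 > 1 then (acc.1, acc.2 + 1)
        else (acc.1 ++ [""], acc.2 + 1)
      else (acc.1 ++ [PySem.Str.strip line], 0)) ([], 0)
  PySem.Str.strip (PySem.Str.join "\n" r.1)

-- ===== PORT B =====
def normalize_memory_content_py_alt (content : String) : String :=
  let stripped := ((PySem.Str.split? (PySem.Str.replace content "\r\n" "\n") "\n").getD []).map PySem.Str.strip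
  let kept := ((("" :: stripped).zip stripped).filter (fun pc => pc.2 != "" || pc.1 != "")).map Prod.snd
  PySem.Str.strip (PySem.Str.join "\n" kept)

-- ===== PRECONDITION & SPEC =====
def Spec_normalize_memory_content_py (content : String) (out : String) : Prop := out = normalize_memory_content_py_alt content
instance (content : String) (out : String) : Decidable (Spec_normalize_memory_content_py content out) := by unfold Spec_normalize_memory_content_py; infer_instance

-- ===== CLAIM (what is proved, stated in full; the proofs are below) =====
def Claim_equal_normalize_memory_content_py : Prop := ∀ (content : String), Dom_normalize_memory_content_py content → Spec_normalize_memory_content_py content (normalize_memory_content_py content)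

-- ===== LEMMAS AND PROOFS =====

-- A's loop step, rephrased on the already-stripped line (proof helper)
def pvStepS (acc : List String × Int) (s : String) : List String × Int :=
  if s == "" then
    if acc.2 + 1 > 1 then (acc.1, acc.2 + 1)
    else (acc.1 ++ [""], acc.2 + 1)
  else (acc.1 ++ [s], 0)

-- B's filter condition (proof helper)
def pvCondB (pc : String × String) : Bool := pc.2 != "" || pc.1 != ""

lemma pv_dropWhile_idem {a : Type} (p : a → Bool) (l : List a) :
    List.dropWhile p (List.dropWhile p l) = List.dropWhile p l := by
  induction l with
  | nil => rfl
  | cons x l ih =>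
    rw [List.dropWhile_cons]
    by_cases h : p x
    · rw [if_pos h]; exact ih
    · rw [if_neg h, List.dropWhile_cons, if_neg h]

lemma pv_rstrip_cons (a : Char) (v : List Char) :
    PySem.Chars.rstrip (a :: v) =
      if PySem.Chars.rstrip v = [] then (if PySem.Chars.isspace a then [] else [a])
      else a :: PySem.Chars.rstrip v := by
  have hrv : PySem.Chars.rstrip v = (List.dropWhile PySem.Chars.isspace v.reverse).reverse := rfl
  show (List.dropWhile PySem.Chars.isspace (a :: v).reverse).reverse = _
  rw [List.reverse_cons, List.dropWhile_append]
  by_cases h : List.dropWhile PySem.Chars.isspace v.reverse = []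
  · have h' : PySem.Chars.rstrip v = [] := by rw [hrv, h]; rfl
    rw [if_pos (by simp [h]), if_pos h']
    by_cases ha : PySem.Chars.isspace a
    · simp [ha]
    · simp [ha]
  · have h' : PySem.Chars.rstrip v ≠ [] := by rw [hrv]; simpa using h
    rw [if_neg (by simpa using h), if_neg h']
    simp [hrv]

lemma pv_rstrip_idem (v : List Char) :
    PySem.Chars.rstrip (PySem.Chars.rstrip v) = PySem.Chars.rstrip v := by
  show (List.dropWhile PySem.Chars.isspace
      ((List.dropWhile PySem.Chars.isspace v.reverse).reverse).reverse).reverse = _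
  rw [List.reverse_reverse, pv_dropWhile_idem]
  rfl

lemma pv_key (u : List Char) (hu : List.dropWhile PySem.Chars.isspace u = u) :
    PySem.Chars.rstrip (List.dropWhile PySem.Chars.isspace (PySem.Chars.rstrip u)) =
      PySem.Chars.rstrip u := by
  cases u with
  | nil => rfl
  | cons a u' =>
    have hpa : ¬ PySem.Chars.isspace a = true := by
      intro hpa
      rw [List.dropWhile_cons, if_pos hpa] at hu
      have h1 := congrArg List.length hu
      have h2 := List.length_dropWhile_le PySem.Chars.isspace u'
      simp at h1; omega
    rw [pv_rstrip_cons]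
    by_cases h : PySem.Chars.rstrip u' = []
    · rw [if_pos h, if_neg hpa]
      simp [PySem.Chars.rstrip, hpa]
    · rw [if_neg h, List.dropWhile_cons, if_neg hpa, pv_rstrip_cons, pv_rstrip_idem, if_neg h]

lemma pv_strip_rstrip (s : List Char) :
    PySem.Chars.strip (PySem.Chars.rstrip s) = PySem.Chars.strip s := by
  have hw : List.dropWhile PySem.Chars.isspace (List.takeWhile PySem.Chars.isspace s).reverse = [] :=
    List.dropWhile_eq_nil_iff.mpr (fun x hx => List.mem_takeWhile_imp (List.mem_reverse.mp hx))
  have hw' : List.dropWhile PySem.Chars.isspace (List.takeWhile PySem.Chars.isspace s) = [] :=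
    List.dropWhile_eq_nil_iff.mpr (fun x hx => List.mem_takeWhile_imp hx)
  have hdecomp : s.reverse = (List.dropWhile PySem.Chars.isspace s).reverse ++
      (List.takeWhile PySem.Chars.isspace s).reverse := by
    rw [← List.reverse_append, List.takeWhile_append_dropWhile]
  have hrs : PySem.Chars.rstrip s =
      (List.dropWhile PySem.Chars.isspace
        ((List.dropWhile PySem.Chars.isspace s).reverse ++
          (List.takeWhile PySem.Chars.isspace s).reverse)).reverse := by
    show (List.dropWhile PySem.Chars.isspace s.reverse).reverse = _
    rw [hdecomp]
  by_cases h : List.dropWhile PySem.Chars.isspace (List.dropWhile PySem.Chars.isspace s).reverse = []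
  · have h0 : PySem.Chars.rstrip s = [] := by
      rw [hrs, List.dropWhile_append, if_pos (by simp [h]), hw]; rfl
    have h1 : PySem.Chars.strip s = [] := by
      show PySem.Chars.rstrip (PySem.Chars.lstrip s) = []
      show (List.dropWhile PySem.Chars.isspace (List.dropWhile PySem.Chars.isspace s).reverse).reverse = []
      rw [h]; rfl
    rw [h0, h1]; rfl
  · have h0 : PySem.Chars.rstrip s = List.takeWhile PySem.Chars.isspace s ++
        PySem.Chars.rstrip (List.dropWhile PySem.Chars.isspace s) := by
      rw [hrs, List.dropWhile_append, if_neg (by simpa using h), List.reverse_append,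
        List.reverse_reverse]
      rfl
    show PySem.Chars.rstrip (PySem.Chars.lstrip (PySem.Chars.rstrip s)) = _
    rw [h0]
    show PySem.Chars.rstrip (List.dropWhile PySem.Chars.isspace _) = _
    rw [List.dropWhile_append, if_pos (by simp [hw']),
      pv_key _ (pv_dropWhile_idem PySem.Chars.isspace s)]
    rfl

lemma pv_str_strip_rstrip (s : String) :
    PySem.Str.strip (PySem.Str.rstrip s) = PySem.Str.strip s := by
  rw [← String.toList_inj]
  simp [PySem.Str.toList_strip, PySem.Str.toList_rstrip, pv_strip_rstrip]

lemma pv_stepA_eq (acc : List String × Int) (l : String) :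
    (if PySem.Str.strip (PySem.Str.rstrip l) == "" then
        if acc.2 + 1 > 1 then (acc.1, acc.2 + 1)
        else (acc.1 ++ [""], acc.2 + 1)
      else (acc.1 ++ [PySem.Str.strip (PySem.Str.rstrip l)], 0)) = pvStepS acc (PySem.Str.strip l) := by
  rw [pv_str_strip_rstrip]; rfl

lemma pv_fold_lemma (S : List String) (acc : List String) (k : Int) (prev : String)
    (h : 1 ≤ k ↔ prev = "") (hk : 0 ≤ k) :
    (List.foldl pvStepS (acc, k) S).1 =
      acc ++ (((prev :: S).zip S).filter pvCondB).map Prod.snd := by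
  induction S generalizing acc k prev with
  | nil => simp
  | cons s T ih =>
    by_cases hs : s = ""
    · subst hs
      by_cases h1 : 1 ≤ k
      · have hp : prev = "" := h.mp h1
        have hgt : k + 1 > 1 := by omega
        have hstep : pvStepS (acc, k) "" = (acc, k + 1) := by
          simp [pvStepS, hgt]
        rw [List.foldl_cons, hstep,
          ih acc (k + 1) "" ⟨fun _ => rfl, fun _ => by omega⟩ (by omega)]
        simp [hp, pvCondB]
      · have hp : prev ≠ "" := fun he => h1 (h.mpr he)
        have hgt : ¬ (k + 1 > 1) := by omega
        have hstep : pvStepS (acc, k) "" = (acc ++ [""], k + 1) := by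
          simp [pvStepS, hgt]
        rw [List.foldl_cons, hstep,
          ih (acc ++ [""]) (k + 1) "" ⟨fun _ => rfl, fun _ => by omega⟩ (by omega)]
        simp [pvCondB, hp]
    · have hstep : pvStepS (acc, k) s = (acc ++ [s], 0) := by
        simp [pvStepS, hs]
      rw [List.foldl_cons, hstep,
        ih (acc ++ [s]) 0 s ⟨fun h0 => absurd h0 (by omega), fun he => absurd he hs⟩ (by omega)]
      simp [pvCondB, hs]

lemma pv_strip_newline_cons (cs : List Char) :
    PySem.Chars.strip ('\n' :: cs) = PySem.Chars.strip cs := by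
  have hn : PySem.Chars.isspace '\n' = true := by decide
  show PySem.Chars.rstrip (List.dropWhile PySem.Chars.isspace ('\n' :: cs)) = _
  rw [List.dropWhile_cons, if_pos hn]
  rfl

lemma pv_strip_join_empty_cons (xs : List String) :
    PySem.Str.strip (PySem.Str.join "\n" ("" :: xs)) = PySem.Str.strip (PySem.Str.join "\n" xs) := by
  cases xs with
  | nil => rfl
  | cons y ys =>
    rw [← String.toList_inj]
    simp only [PySem.Str.toList_strip, PySem.Str.toList_join, List.map_cons]
    have he : ("" : String).toList = [] := rfl
    rw [he]
    have hj : PySem.Chars.join "\n".toList ([] :: y.toList :: ys.map String.toList) =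
        '\n' :: PySem.Chars.join "\n".toList (y.toList :: ys.map String.toList) := by
      simp [PySem.Chars.join, List.intercalate, List.intersperse]
    rw [hj, pv_strip_newline_cons]

-- the core: A's folded compact list and B's filtered list give the same stripped join
lemma pv_core (S : List String) :
    PySem.Str.strip (PySem.Str.join "\n" (List.foldl pvStepS ([], 0) S).1) =
      PySem.Str.strip (PySem.Str.join "\n" (((("" :: S).zip S).filter pvCondB).map Prod.snd)) := by
  cases S with
  | nil => rfl
  | cons s T =>
    by_cases hs : s = ""
    · subst hs
      have h1 : pvStepS ([], 0) "" = ([""], 1) := by simp [pvStepS]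
      rw [List.foldl_cons, h1,
        pv_fold_lemma T [""] 1 "" (by simp) (by omega)]
      have h2 : ((("" :: "" :: T).zip ("" :: T)).filter pvCondB).map Prod.snd =
          ((("" :: T).zip T).filter pvCondB).map Prod.snd := by
        simp [pvCondB]
      rw [h2]
      exact pv_strip_join_empty_cons _
    · have h1 : pvStepS ([], 0) s = ([s], 0) := by simp [pvStepS, hs]
      rw [List.foldl_cons, h1,
        pv_fold_lemma T [s] 0 s (by simp [hs]) (by omega)]
      have h2 : ((("" :: s :: T).zip (s :: T)).filter pvCondB).map Prod.snd =
          s :: (((s :: T).zip T).filter pvCondB).map Prod.snd := by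
        simp [pvCondB, hs]
      rw [h2]
      rfl

-- ===== VERDICT (by name: the statement is the Claim_ definition above) =====
theorem normalize_memory_content_py_spec : Claim_equal_normalize_memory_content_py := by
  intro content _
  unfold Spec_normalize_memory_content_py normalize_memory_content_py normalize_memory_content_py_alt
  simp only [List.foldl_map]
  have hfun : (fun (acc : List String × Int) (l : String) =>
      if PySem.Str.strip (PySem.Str.rstrip l) == "" then
        if acc.2 + 1 > 1 then (acc.1, acc.2 + 1)
        else (acc.1 ++ [""], acc.2 + 1)
      else (acc.1 ++ [PySem.Str.strip (PySem.Str.rstrip l)], 0)) =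
      (fun acc l => pvStepS acc (PySem.Str.strip l)) := by
    funext acc l; exact pv_stepA_eq acc l
  rw [hfun, show (fun (acc : List String × Int) (l : String) => pvStepS acc (PySem.Str.strip l)) =
      (fun acc l => pvStepS acc (PySem.Str.strip l)) from rfl, ← List.foldl_map]
  exact pv_core _
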